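-- pv_equiv track=rewrite | github.com/sriramcu/ffmpeg_video_editing | ffmpeg_batch_cut.py | segment_reverser
-- ===== SOURCE A (Python) =====
-- def segment_reverser(to_be_removed_segments, video_duration):
--     """
--     Converts segments to be removed from the video to segments of the video to be preserved
--     """
--     reversed_segments = []
--     position = 0
--     if to_be_removed_segments and to_be_removed_segments[0][0] == 0:
--         position = to_be_removed_segments[0][1]
--         to_be_removed_segments = to_be_removed_segments[1:]
--     for i in range(len(to_be_removed_segments)):
--
--         if position != to_be_removed_segments[i][0]:
--             reversed_segments.append([position, to_be_removed_segments[i][0]])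
--         if (i + 1) < len(to_be_removed_segments):
--             reversed_segments.append([to_be_removed_segments[i][1], to_be_removed_segments[i + 1][0]])
--         else:
--             reversed_segments.append([to_be_removed_segments[i][1], video_duration])
--         position = reversed_segments[-1][-1]
--
--     if not reversed_segments:
--         reversed_segments.append([position, video_duration])
--     return reversed_segments
-- ===== SOURCE B (Python) =====
-- def segment_reverser(to_be_removed_segments, video_duration):
--     segs = to_be_removed_segments
--     position = 0
--     if segs and segs[0][0] == 0:
--         position = segs[0][1]
--         segs = segs[1:]
--     bounds = [position] + [x for s in segs for x in (s[0], s[1])] + [video_duration]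
--     result = []
--     rest = bounds
--     while rest:
--         result.append([rest[0], rest[1]])
--         rest = rest[2:]
--     if segs and result[0][0] == result[0][1]:
--         result.pop(0)
--     return result
-- ===== Notes on version B (the rewrite author's own statement) =====
-- stated objective: alternative
-- what changed: Instead of A's single indexed loop with lookahead, conditional gap-append and position carried through the last appended element, B flattens the boundaries into one list [position, s0,e0, s1,e1, ..., duration] and pairs it up two at a time, then drops the leading pair iff it is zero-length and segments remain.
import Mathlib
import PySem

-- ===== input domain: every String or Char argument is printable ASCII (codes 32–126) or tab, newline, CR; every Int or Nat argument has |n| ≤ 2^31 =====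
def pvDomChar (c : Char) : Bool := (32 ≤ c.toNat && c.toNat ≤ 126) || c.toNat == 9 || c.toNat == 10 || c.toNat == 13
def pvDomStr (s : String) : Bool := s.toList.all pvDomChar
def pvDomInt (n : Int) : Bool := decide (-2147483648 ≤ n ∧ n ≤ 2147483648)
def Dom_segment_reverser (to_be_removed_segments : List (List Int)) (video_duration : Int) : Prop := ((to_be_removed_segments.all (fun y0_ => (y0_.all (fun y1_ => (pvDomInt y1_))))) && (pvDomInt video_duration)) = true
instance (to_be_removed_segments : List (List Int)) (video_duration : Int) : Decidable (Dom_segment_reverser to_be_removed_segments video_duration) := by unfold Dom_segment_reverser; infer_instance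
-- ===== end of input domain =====

-- B re-derives the preserved segments by flattening all boundaries into one list and pairing them two at a time
-- (then dropping a zero-length leading pair), instead of A's indexed loop with lookahead and carried position;
-- same cost, different decomposition.


-- ===== PORT A =====
def pvALoop (segs : List (List Int)) (dur : Int) (i : Nat) (position : Int)
    (rev : List (List Int)) : List (List Int) × Int :=
  if h : i < segs.length then
    let si := segs.getD i []
    let rev := if position ≠ si.getD 0 0 then rev ++ [[position, si.getD 0 0]] else rev
    let rev := if i + 1 < segs.length then
        rev ++ [[si.getD 1 0, (segs.getD (i+1) []).getD 0 0]]
      else rev ++ [[si.getD 1 0, dur]]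
    pvALoop segs dur (i+1) ((rev.getLast?.getD []).getLast?.getD 0) rev
  else (rev, position)
termination_by segs.length - i

-- literal transliteration of A: leading-zero handling, indexed loop with lookahead, final empty check
def segment_reverser (to_be_removed_segments : List (List Int)) (video_duration : Int) : List (List Int) :=
  let position : Int := 0
  let st :=
    if to_be_removed_segments ≠ [] ∧ (to_be_removed_segments.headD []).getD 0 0 = 0 then
      ((to_be_removed_segments.headD []).getD 1 0, to_be_removed_segments.drop 1)
    else (position, to_be_removed_segments)
  let res := pvALoop st.2 video_duration 0 st.1 []
  if res.1 = [] then [[res.2, video_duration]] else res.1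

-- ===== PORT B =====
-- boundary list [position, s[0], s[1] for each s, duration]
def pvFlat (segs : List (List Int)) : List Int :=
  segs.flatMap (fun s => [s.getD 0 0, s.getD 1 0])

-- Source B's while loop: take two boundaries at a time (singleton case unreachable in use; Python would raise)
def pvChunks2 : List Int → List (List Int)
  | [] => []
  | [a] => [[a, 0]]
  | a :: b :: rest => [a, b] :: pvChunks2 rest

def segment_reverser_alt (to_be_removed_segments : List (List Int)) (video_duration : Int) : List (List Int) :=
  let st :=
    if to_be_removed_segments ≠ [] ∧ (to_be_removed_segments.headD []).getD 0 0 = 0 then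
      ((to_be_removed_segments.headD []).getD 1 0, to_be_removed_segments.drop 1)
    else ((0 : Int), to_be_removed_segments)
  let bounds := [st.1] ++ pvFlat st.2 ++ [video_duration]
  let result := pvChunks2 bounds
  if st.2 ≠ [] ∧ (result.headD []).getD 0 0 = (result.headD []).getD 1 0 then
    result.drop 1
  else result

-- ===== PRECONDITION & SPEC =====
-- Pre_ excludes exactly the inputs on which Python A raises IndexError: an inner segment list with fewer than 2 elements
def Pre_segment_reverser (to_be_removed_segments : List (List Int)) (video_duration : Int) : Prop :=
  ∀ s ∈ to_be_removed_segments, 2 ≤ s.length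
instance (to_be_removed_segments : List (List Int)) (video_duration : Int) : Decidable (Pre_segment_reverser to_be_removed_segments video_duration) := by unfold Pre_segment_reverser; infer_instance
def pvWitness_segment_reverser : List (List Int) × Int := ([[1, 2], [4, 6]], 9)

def Spec_segment_reverser (to_be_removed_segments : List (List Int)) (video_duration : Int) (out : List (List Int)) : Prop := out = segment_reverser_alt to_be_removed_segments video_duration
instance (to_be_removed_segments : List (List Int)) (video_duration : Int) (out : List (List Int)) : Decidable (Spec_segment_reverser to_be_removed_segments video_duration out) := by unfold Spec_segment_reverser; infer_instance

-- ===== CLAIM (what is proved, stated in full; the proofs are below) =====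
def Claim_equal_segment_reverser : Prop := ∀ (to_be_removed_segments : List (List Int)) (video_duration : Int), Dom_segment_reverser to_be_removed_segments video_duration → Pre_segment_reverser to_be_removed_segments video_duration → Spec_segment_reverser to_be_removed_segments video_duration (segment_reverser to_be_removed_segments video_duration)

-- ===== LEMMAS AND PROOFS =====

-- the tail pairs [e_i, s_{i+1}] ... [e_last, duration] shared by both characterisations
def pvG (dur : Int) : List (List Int) → List (List Int)
  | [] => []
  | s :: rest =>
    match rest with
    | [] => [[s.getD 1 0, dur]]
    | t :: _ => [s.getD 1 0, t.getD 0 0] :: pvG dur rest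

-- functional form of A's loop starting at the remaining segments
def pvF (dur : Int) : Int → List (List Int) → List (List Int)
  | _, [] => []
  | pos, s :: rest =>
    (if pos ≠ s.getD 0 0 then [[pos, s.getD 0 0]] else []) ++
    (match rest with
     | [] => [[s.getD 1 0, dur]]
     | t :: _ => [s.getD 1 0, t.getD 0 0] :: pvF dur (t.getD 0 0) rest)

lemma pvF_eq_pvG (dur : Int) : ∀ (segs : List (List Int)) (pos : Int),
    pvF dur pos segs =
      (match segs with
       | [] => ([] : List (List Int))
       | s :: _ => if pos ≠ s.getD 0 0 then [[pos, s.getD 0 0]] else []) ++ pvG dur segs := by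
  intro segs
  induction segs with
  | nil => intro pos; simp [pvF, pvG]
  | cons s tl ih =>
    intro pos
    cases tl with
    | nil => simp [pvF, pvG]
    | cons t tl2 =>
      have h1 : pvF dur pos (s :: t :: tl2) =
          (if pos ≠ s.getD 0 0 then [[pos, s.getD 0 0]] else []) ++
          ([s.getD 1 0, t.getD 0 0] :: pvF dur (t.getD 0 0) (t :: tl2)) := rfl
      have h2 : pvG dur (s :: t :: tl2) = [s.getD 1 0, t.getD 0 0] :: pvG dur (t :: tl2) := rfl
      rw [h1, h2, ih (t.getD 0 0)]
      simp

lemma pvLastLast (l : List (List Int)) (a b : Int) :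
    (((l ++ [[a, b]]).getLast?.getD []).getLast?.getD 0) = b := by
  rw [List.getLast?_concat]
  simp

lemma pvALoop_fst (dur : Int) : ∀ (segs : List (List Int)) (i : Nat) (pos : Int) (rev : List (List Int)),
    (pvALoop segs dur i pos rev).1 = rev ++ pvF dur pos (segs.drop i) := by
  intro segs i pos rev
  fun_induction pvALoop segs dur i pos rev with
  | case1 i pos rev h si rev1 rev2 ih =>
    have hgi : segs.getD i [] = segs[i] := List.getD_eq_getElem segs [] h
    have hdrop : List.drop i segs = segs[i] :: List.drop (i+1) segs := List.drop_eq_getElem_cons h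
    have e1 : rev1 = if pos ≠ segs[i].getD 0 0 then rev ++ [[pos, segs[i].getD 0 0]] else rev := by
      simp [rev1, si, List.getElem?_eq_getElem h]
    rw [ih]
    by_cases h2 : i + 1 < segs.length
    · have hdrop2 : List.drop (i+1) segs = segs[i+1] :: List.drop (i+2) segs := List.drop_eq_getElem_cons h2
      have e2 : rev2 = rev1 ++ [[segs[i].getD 1 0, segs[i+1].getD 0 0]] := by
        simp [rev2, si, if_pos h2, List.getElem?_eq_getElem h, List.getElem?_eq_getElem h2]
      have hR : pvF dur pos (List.drop i segs) =
          (if pos ≠ segs[i].getD 0 0 then [[pos, segs[i].getD 0 0]] else []) ++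
          ([segs[i].getD 1 0, segs[i+1].getD 0 0] ::
            pvF dur (segs[i+1].getD 0 0) (List.drop (i+1) segs)) := by
        rw [hdrop, hdrop2]; rfl
      rw [e2, pvLastLast, hR, e1]
      split <;> simp
    · have hdrop2 : List.drop (i+1) segs = [] := by
        apply List.drop_eq_nil_of_le; omega
      have e2 : rev2 = rev1 ++ [[segs[i].getD 1 0, dur]] := by
        simp [rev2, si, if_neg h2, List.getElem?_eq_getElem h]
      have hR : pvF dur pos (List.drop i segs) =
          (if pos ≠ segs[i].getD 0 0 then [[pos, segs[i].getD 0 0]] else []) ++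
          [[segs[i].getD 1 0, dur]] := by
        rw [hdrop, hdrop2]; rfl
      rw [e2, pvLastLast, hdrop2, hR, e1]
      simp only [pvF]
      split <;> simp
  | case2 i pos rev h =>
    have hdrop : List.drop i segs = [] := by
      apply List.drop_eq_nil_of_le; omega
    simp [hdrop, pvF]

lemma pvALoop_nil (dur : Int) (pos : Int) :
    pvALoop [] dur 0 pos [] = ([], pos) := by
  unfold pvALoop; simp

lemma pvG_ne_nil (dur : Int) (s : List Int) (rest : List (List Int)) :
    pvG dur (s :: rest) ≠ [] := by
  cases rest <;> simp [pvG]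

lemma pvChunks2_spec (dur : Int) : ∀ (segs : List (List Int)) (pos : Int),
    pvChunks2 (pos :: (pvFlat segs ++ [dur])) =
      (match segs with
       | [] => [[pos, dur]]
       | s :: _ => [pos, s.getD 0 0] :: pvG dur segs) := by
  intro segs
  induction segs with
  | nil => intro pos; simp [pvFlat, pvChunks2]
  | cons s rest ih =>
    intro pos
    have hflat : pvFlat (s :: rest) = s.getD 0 0 :: s.getD 1 0 :: pvFlat rest := by
      simp [pvFlat]
    rw [hflat]
    simp only [List.cons_append, pvChunks2]
    congr 1
    cases rest with
    | nil => simp [pvFlat, pvChunks2, pvG]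
    | cons t tl =>
      rw [ih (s.getD 1 0)]
      simp [pvG]

theorem pv_main (pos : Int) (segs : List (List Int)) (dur : Int) :
    (if (pvALoop segs dur 0 pos []).1 = [] then [[(pvALoop segs dur 0 pos []).2, dur]]
     else (pvALoop segs dur 0 pos []).1) =
    (if segs ≠ [] ∧ ((pvChunks2 ([pos] ++ pvFlat segs ++ [dur])).headD []).getD 0 0 =
          ((pvChunks2 ([pos] ++ pvFlat segs ++ [dur])).headD []).getD 1 0 then
       (pvChunks2 ([pos] ++ pvFlat segs ++ [dur])).drop 1
     else pvChunks2 ([pos] ++ pvFlat segs ++ [dur])) := by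
  cases hsegs : segs with
  | nil =>
    rw [pvALoop_nil dur pos]
    simp [pvFlat, pvChunks2]
  | cons s rest =>
    have hfst : (pvALoop (s :: rest) dur 0 pos []).1 = pvF dur pos (s :: rest) := by
      simpa using pvALoop_fst dur (s :: rest) 0 pos []
    have hF : pvF dur pos (s :: rest) =
        (if pos ≠ s.getD 0 0 then [[pos, s.getD 0 0]] else []) ++ pvG dur (s :: rest) := by
      simpa using pvF_eq_pvG dur (s :: rest) pos
    have hne : (pvALoop (s :: rest) dur 0 pos []).1 ≠ [] := by
      rw [hfst, hF]
      by_cases hp : pos ≠ s.getD 0 0 <;> simp [pvG_ne_nil]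
    rw [if_neg hne, hfst, hF]
    have hch := pvChunks2_spec dur (s :: rest) pos
    simp only [List.cons_append, List.nil_append] at hch ⊢
    rw [hch]
    by_cases hp : pos = s.getD 0 0
    · have hcond : (s :: rest ≠ [] ∧
          (([pos, s.getD 0 0] :: pvG dur (s :: rest)).headD []).getD 0 0 =
          (([pos, s.getD 0 0] :: pvG dur (s :: rest)).headD []).getD 1 0) :=
        ⟨by simp, by simp [List.getD, hp]⟩
      rw [if_pos hcond]
      simp [hp]
    · have hcond : ¬ (s :: rest ≠ [] ∧
          (([pos, s.getD 0 0] :: pvG dur (s :: rest)).headD []).getD 0 0 =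
          (([pos, s.getD 0 0] :: pvG dur (s :: rest)).headD []).getD 1 0) := by
        rintro ⟨-, heq⟩
        exact hp (by simpa [List.getD] using heq)
      rw [if_neg hcond]
      have hp' : ¬ pos = s[0]?.getD 0 := by simpa [List.getD] using hp
      simp [hp']

-- ===== VERDICT (by name: the statement is the Claim_ definition above) =====
theorem segment_reverser_spec : Claim_equal_segment_reverser := by
  intro segs0 dur _ _
  unfold Spec_segment_reverser segment_reverser segment_reverser_alt
  exact pv_main _ _ dur
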